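-- pv_equiv track=rewrite | github.com/stolniceanudenisa/Public-key-cryptography | Lab/ContinuousFractionsMethod/main.py | compute_c
-- ===== SOURCE A (Python) =====
-- def compute_c(B_base, b_vectors, b_vectors_combinations, combination_index):
--     combinations_old = b_vectors_combinations[combination_index]
--     product_c = 1
--     for i in range(len(B_base)):
--         gamma_i = 0
--         for b_vector_index in combinations_old:
--             gamma_i += b_vectors[b_vector_index][i]
--         gamma_i //= 2
--         product_c *= pow(B_base[i], gamma_i)
--     return product_c
-- ===== SOURCE B (Python) =====
-- def compute_c(B_base, b_vectors, b_vectors_combinations, combination_index):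
--     # Count each selected index's multiplicity once, then add each distinct
--     # vector scaled by its count; finally form the product recursively.
--     counts = {}
--     for j in b_vectors_combinations[combination_index]:
--         counts[j] = counts.get(j, 0) + 1
--     n = len(B_base)
--     gamma = [0] * n
--     for j, c in counts.items():
--         for i in range(n):
--             gamma[i] += c * b_vectors[j][i]
--
--     def product_from(i):
--         if i == n:
--             return 1
--         return pow(B_base[i], gamma[i] // 2) * product_from(i + 1)
--
--     return product_from(0)
-- ===== Notes on version B (the rewrite author's own statement) =====
-- stated objective: alternative
-- what changed: A rescans every occurrence in the selected combination for each coordinate; B first builds a multiplicity dictionary (a Counter) of the selected indices, accumulates the exponent vector by adding each DISTINCT vector once scaled by its count, and then forms the product by a recursive descent over the coordinates instead of a loop.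
-- outside the precondition, e.g. on compute_c([2], [[-2]], [[0]], 0): A returns 0.5, B returns 0.5
import Mathlib
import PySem

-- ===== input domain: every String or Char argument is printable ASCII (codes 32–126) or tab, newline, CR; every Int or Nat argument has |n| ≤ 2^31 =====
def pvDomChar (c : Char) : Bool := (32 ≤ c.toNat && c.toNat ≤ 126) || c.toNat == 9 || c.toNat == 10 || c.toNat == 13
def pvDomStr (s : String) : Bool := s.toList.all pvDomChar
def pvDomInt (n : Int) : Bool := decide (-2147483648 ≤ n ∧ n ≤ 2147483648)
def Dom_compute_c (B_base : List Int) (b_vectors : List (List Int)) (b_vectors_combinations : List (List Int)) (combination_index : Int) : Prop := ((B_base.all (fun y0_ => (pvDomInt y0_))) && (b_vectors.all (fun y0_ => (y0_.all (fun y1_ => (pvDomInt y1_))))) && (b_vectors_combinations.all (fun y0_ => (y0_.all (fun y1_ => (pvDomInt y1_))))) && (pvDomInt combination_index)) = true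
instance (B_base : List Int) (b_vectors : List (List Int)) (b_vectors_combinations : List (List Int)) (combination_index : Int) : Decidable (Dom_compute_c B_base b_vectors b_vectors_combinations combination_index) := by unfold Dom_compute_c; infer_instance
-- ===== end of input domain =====

-- B replaces A's per-coordinate rescan of every occurrence in the selected combination by a
-- multiplicity dictionary (Counter) over the selected indices — each distinct vector is added
-- once, scaled by its count — and forms the final product by recursion over the coordinates;
-- an alternative decomposition, not claimed faster.

-- ===== PORT A =====
def compute_c (B_base : List Int) (b_vectors : List (List Int)) (b_vectors_combinations : List (List Int)) (combination_index : Int) : Int :=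
  let combinations_old := (PySem.List.pyGet? b_vectors_combinations combination_index).getD []
  (PySem.List.pyRange 0 (PySem.List.len B_base) 1).foldl
    (fun product_c i =>
      let gamma_i := combinations_old.foldl
        (fun g j => g + PySem.List.pyGetD ((PySem.List.pyGet? b_vectors j).getD []) i 0) 0
      let gamma_i := PySem.Int.floordiv gamma_i 2
      product_c * PySem.List.pyGetD B_base i 0 ^ gamma_i.toNat) 1

-- ===== PORT B =====
-- Python's 'if i == n: return 1' is ported as 'bb.length ≤ i': along the recursion from 0 by
-- +1 steps the guard fires exactly at i = n, and '≤' makes the recursion total.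
def prodFrom (bb g : List Int) (i : Nat) : Int :=
  if bb.length ≤ i then 1
  else PySem.List.pyGetD bb (i : Int) 0 ^ (PySem.Int.floordiv (PySem.List.pyGetD g (i : Int) 0) 2).toNat
         * prodFrom bb g (i + 1)
termination_by bb.length - i

def compute_c_alt (B_base : List Int) (b_vectors : List (List Int)) (b_vectors_combinations : List (List Int)) (combination_index : Int) : Int :=
  let counts := ((PySem.List.pyGet? b_vectors_combinations combination_index).getD []).foldl
    (fun d j => d.insert j (d.getD j 0 + 1)) PySem.Dict.empty
  let n := B_base.length
  let gamma := counts.items.foldl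
    (fun g jc => (List.range n).foldl
      (fun g i => g.set i (g.getD i 0 +
        jc.2 * PySem.List.pyGetD ((PySem.List.pyGet? b_vectors jc.1).getD []) (i : Int) 0)) g)
    (List.replicate n 0)
  prodFrom B_base gamma 0

-- ===== PRECONDITION & SPEC =====
-- Pre_ excludes exactly the inputs on which the Python A does not return an int: IndexError on
-- the combination index, on a selected vector index or a too-short selected vector (reachable
-- only when B_base is nonempty), and the inputs whose accumulated exponent at some coordinate
-- is negative, where Python's pow returns a float (or raises ZeroDivisionError for base 0).
def Pre_compute_c (B_base : List Int) (b_vectors : List (List Int)) (b_vectors_combinations : List (List Int)) (combination_index : Int) : Prop :=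
  PySem.Raise.InRange b_vectors_combinations.length combination_index ∧
  (B_base ≠ [] → ∀ j ∈ (PySem.List.pyGet? b_vectors_combinations combination_index).getD [],
      PySem.Raise.InRange b_vectors.length j ∧
      B_base.length ≤ ((PySem.List.pyGet? b_vectors j).getD []).length) ∧
  (∀ i ∈ List.range B_base.length,
      0 ≤ (((PySem.List.pyGet? b_vectors_combinations combination_index).getD []).map
            (fun j => ((PySem.List.pyGet? b_vectors j).getD []).getD i 0)).sum)
instance (B_base : List Int) (b_vectors : List (List Int)) (b_vectors_combinations : List (List Int)) (combination_index : Int) : Decidable (Pre_compute_c B_base b_vectors b_vectors_combinations combination_index) := by unfold Pre_compute_c; infer_instance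

def pvWitness_compute_c : List Int × List (List Int) × List (List Int) × Int :=
  ([2, 3], [[2, 0], [0, 4]], [[0, 1]], 0)

def Spec_compute_c (B_base : List Int) (b_vectors : List (List Int)) (b_vectors_combinations : List (List Int)) (combination_index : Int) (out : Int) : Prop := out = compute_c_alt B_base b_vectors b_vectors_combinations combination_index
instance (B_base : List Int) (b_vectors : List (List Int)) (b_vectors_combinations : List (List Int)) (combination_index : Int) (out : Int) : Decidable (Spec_compute_c B_base b_vectors b_vectors_combinations combination_index out) := by unfold Spec_compute_c; infer_instance

-- ===== CLAIM (what is proved, stated in full; the proofs are below) =====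
def Claim_equal_compute_c : Prop := ∀ (B_base : List Int) (b_vectors : List (List Int)) (b_vectors_combinations : List (List Int)) (combination_index : Int), Dom_compute_c B_base b_vectors b_vectors_combinations combination_index → Pre_compute_c B_base b_vectors b_vectors_combinations combination_index → Spec_compute_c B_base b_vectors b_vectors_combinations combination_index (compute_c B_base b_vectors b_vectors_combinations combination_index)

-- ===== LEMMAS AND PROOFS =====

-- summing 'if k = x then f k else 0' over a list not containing x is 0
lemma sum_if_zero {d : List Int} {x : Int} (hx : x ∉ d) (f : Int → Int) :
    (d.map (fun k => if k = x then f k else 0)).sum = 0 := by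
  induction d with
  | nil => simp
  | cons a d ih =>
    have ha : ¬ a = x := fun h => hx (by simp [h])
    have hx' : x ∉ d := fun h => hx (List.mem_cons_of_mem a h)
    simp only [List.map_cons, List.sum_cons, if_neg ha, ih hx', add_zero]

-- over a Nodup list containing x it is f x
lemma sum_if_eq {d : List Int} (hnd : d.Nodup) {x : Int} (hx : x ∈ d) (f : Int → Int) :
    (d.map (fun k => if k = x then f k else 0)).sum = f x := by
  induction d with
  | nil => cases hx
  | cons a d ih =>
    rcases List.nodup_cons.mp hnd with ⟨had, hd⟩
    rcases List.mem_cons.mp hx with h | h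
    · have hxd : x ∉ d := h ▸ had
      subst h
      simp [sum_if_zero hxd]
    · have ha : ¬ a = x := fun hax => had (hax ▸ h)
      simp only [List.map_cons, List.sum_cons, if_neg ha, ih hd h, zero_add]

-- the Counter collapse: count-weighted sum over the distinct elements = plain sum over the list
lemma sum_count_smul (f : Int → Int) : ∀ (xs d : List Int), d.Nodup → (∀ x ∈ xs, x ∈ d) →
    (d.map (fun k => (xs.count k : Int) * f k)).sum = (xs.map f).sum := by
  intro xs
  induction xs with
  | nil => intro d _ _; simp
  | cons x xs ih =>
    intro d hnd hsub
    have hx : x ∈ d := hsub x List.mem_cons_self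
    have hsub' : ∀ y ∈ xs, y ∈ d := fun y hy => hsub y (List.mem_cons_of_mem x hy)
    have hpt : ∀ k ∈ d, ((List.count k (x :: xs) : Int)) * f k
        = (List.count k xs : Int) * f k + (if k = x then f k else 0) := by
      intro k _
      rcases eq_or_ne k x with h | h
      · simp [h]; ring
      · simp [h, Ne.symm h]
    calc (d.map (fun k => ((List.count k (x :: xs) : Int)) * f k)).sum
        = (d.map (fun k => (List.count k xs : Int) * f k + (if k = x then f k else 0))).sum := by
          rw [List.map_congr_left hpt]
      _ = (d.map (fun k => (List.count k xs : Int) * f k)).sum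
            + (d.map (fun k => if k = x then f k else 0)).sum := PySem.List.sum_map_add_int _ _ _
      _ = (xs.map f).sum + f x := by rw [ih d hnd hsub', sum_if_eq hnd hx]
      _ = ((x :: xs).map f).sum := by simp [add_comm]

-- B's inner range/set loop: adds w i to every coordinate, keeps the length
lemma range_set_fold (w : Nat → Int) (n : Nat) : ∀ (m : Nat) (g : List Int), m ≤ n → g.length = n →
    ((List.range m).foldl (fun g i => g.set i (g.getD i 0 + w i)) g).length = n ∧
    ∀ k < n, ((List.range m).foldl (fun g i => g.set i (g.getD i 0 + w i)) g).getD k 0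
      = g.getD k 0 + (if k < m then w k else 0) := by
  intro m
  induction m with
  | zero => intro g _ hg; simp [hg]
  | succ m ih =>
    intro g hm hg
    obtain ⟨l1, l2⟩ := ih g (by omega) hg
    rw [List.range_succ, List.foldl_append]
    simp only [List.foldl_cons, List.foldl_nil]
    refine ⟨by simpa using l1, ?_⟩
    intro k hk
    rw [List.getD_eq_getElem?_getD, List.getElem?_set]
    by_cases h1 : m = k
    · subst h1
      rw [if_pos rfl, if_pos (by omega)]
      simp only [Option.getD_some]
      rw [l2 m (by omega)]
      simp
    · rw [if_neg h1, ← List.getD_eq_getElem?_getD, l2 k hk]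
      by_cases h2 : k < m
      · have h3 : k < m + 1 := by omega
        simp [h2, h3]
      · have h3 : ¬ k < m + 1 := by omega
        simp [h2, h3]

-- B's outer items loop: coordinate k accumulates the weighted sum over the processed items
lemma items_fold (W : Int → Nat → Int) (n : Nat) : ∀ (items : List (Int × Int)) (g : List Int), g.length = n →
    ((items.foldl (fun g jc => (List.range n).foldl
        (fun g i => g.set i (g.getD i 0 + jc.2 * W jc.1 i)) g) g).length = n ∧
    ∀ k < n, (items.foldl (fun g jc => (List.range n).foldl
        (fun g i => g.set i (g.getD i 0 + jc.2 * W jc.1 i)) g) g).getD k 0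
      = g.getD k 0 + (items.map (fun jc => jc.2 * W jc.1 k)).sum) := by
  intro items
  induction items with
  | nil => intro g hg; exact ⟨hg, by simp⟩
  | cons jc items ih =>
    intro g hg
    obtain ⟨s1, s2⟩ := range_set_fold (fun i => jc.2 * W jc.1 i) n n g (le_refl n) hg
    obtain ⟨l1, l2⟩ := ih _ s1
    refine ⟨l1, ?_⟩
    intro k hk
    simp only [List.foldl_cons]
    rw [l2 k hk, s2 k hk]
    simp [hk, add_assoc]

-- a product over a mapped list as the corresponding left fold
lemma foldl_mul_map (t : Nat → Int) (l : List Nat) :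
    (l.map t).prod = l.foldl (fun p k => p * t k) 1 := by
  rw [List.prod_eq_foldl, List.foldl_map]

-- B's recursive product as a product over the remaining index range
lemma prodFrom_eq (bb g : List Int) : ∀ (m i : Nat), bb.length = i + m →
    prodFrom bb g i = ((List.range' i m).map
      (fun k : Nat => PySem.List.pyGetD bb (k : Int) 0 ^ (PySem.Int.floordiv (PySem.List.pyGetD g (k : Int) 0) 2).toNat)).prod := by
  intro m
  induction m with
  | zero => intro i h; rw [prodFrom]; simp [h]
  | succ m ih =>
    intro i h
    rw [prodFrom, if_neg (by omega), ih (i + 1) (by omega), List.range'_succ]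
    simp

-- ===== VERDICT (by name: the statement is the Claim_ definition above) =====
theorem compute_c_spec : Claim_equal_compute_c := by
  intro B_base b_vectors b_vectors_combinations combination_index _ _
  unfold Spec_compute_c compute_c compute_c_alt
  dsimp only
  rw [PySem.Dict.foldl_insert_getD_add_one_eq_counter, PySem.Dict.items_counter]
  set sel := (PySem.List.pyGet? b_vectors_combinations combination_index).getD [] with hsel
  obtain ⟨hglen, hgget⟩ := items_fold
      (fun j k => PySem.List.pyGetD ((PySem.List.pyGet? b_vectors j).getD []) (k : Int) 0)
      B_base.length ((PySem.Set.ofList sel).map (fun k => (k, (sel.count k : Int))))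
      (List.replicate B_base.length 0) (by simp)
  rw [PySem.List.len_eq, PySem.List.pyRange_one, List.foldl_map]
  simp only [Int.sub_zero, Int.toNat_natCast]
  rw [prodFrom_eq B_base _ B_base.length 0 (by omega), ← List.range_eq_range',
    foldl_mul_map]
  apply PySem.List.foldl_congr_mem
  intro acc k hk
  have hk' : k < B_base.length := List.mem_range.mp hk
  rw [PySem.List.foldl_add]
  simp only [PySem.List.pyGetD_natCast, zero_add] at hgget ⊢
  rw [hgget k hk']
  simp only [List.map_map, Function.comp_def]
  rw [sum_count_smul (fun j => ((PySem.List.pyGet? b_vectors j).getD []).getD k 0)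
      sel (PySem.Set.ofList sel) (PySem.Set.nodup_ofList sel)
      (fun x hx => (PySem.Set.mem_ofList sel x).mpr hx)]
  simp [List.getD_eq_getElem?_getD, hk']
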